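-- pv_equiv track=rewrite | github.com/cl-tohoku/sb-unfurl | sb_unfurl/scrapbox.py | truncate_lines
-- ===== SOURCE A (Python) =====
-- from typing import Tuple, Optional, Iterable, List
--
-- def truncate_lines(lines: Iterable[str]) -> str:
--     n_chars = 0
--     truncated_lines = []
--     for line in lines:
--         if n_chars > 400:
--             break
--         n_chars += len(line)
--         truncated_lines.append(line)
--     return "\n".join(truncated_lines)
-- ===== SOURCE B (Python) =====
-- from bisect import bisect_right
-- from itertools import accumulate
-- from typing import Iterable
--
-- def truncate_lines(lines: Iterable[str]) -> str:
--     lines = list(lines)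
--     before = list(accumulate(map(len, lines), initial=0))[:len(lines)]
--     return "\n".join(lines[:bisect_right(before, 400)])
-- ===== Notes on version B (the rewrite author's own statement) =====
-- stated objective: alternative
-- what changed: B materializes the list of running totals before each line (itertools.accumulate), finds the cut index with a binary search (bisect_right, valid because the totals are nondecreasing), and joins a slice, instead of A's single scanning loop with an accumulator and break.
import Mathlib
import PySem

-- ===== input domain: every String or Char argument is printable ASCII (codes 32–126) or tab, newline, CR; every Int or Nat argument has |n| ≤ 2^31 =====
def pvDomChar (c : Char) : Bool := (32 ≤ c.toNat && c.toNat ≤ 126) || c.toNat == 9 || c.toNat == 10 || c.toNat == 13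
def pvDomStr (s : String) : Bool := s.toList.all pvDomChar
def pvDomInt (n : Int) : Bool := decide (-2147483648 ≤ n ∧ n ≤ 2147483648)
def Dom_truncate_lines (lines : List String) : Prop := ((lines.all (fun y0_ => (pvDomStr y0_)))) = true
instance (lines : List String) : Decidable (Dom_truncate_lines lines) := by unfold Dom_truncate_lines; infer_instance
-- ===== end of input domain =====

-- B replaces A's scanning loop with staged passes: materialize the prefix totals,
-- binary-search the cut index, slice and join;  objective: alternative (same cost).

-- ===== PORT A =====
-- A: explicit loop with a character counter and accumulator list, break when the
-- running total exceeds 400, then join with "\n".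
def truncateLoopA : List String → Int → List String → List String
  | [], _, acc => acc
  | line :: rest, nChars, acc =>
    if nChars > 400 then acc
    else truncateLoopA rest (nChars + PySem.Str.len line) (acc ++ [line])

def truncate_lines (lines : List String) : String :=
  PySem.Str.join "\n" (truncateLoopA lines 0 [])

-- ===== PORT B =====
-- bisect.bisect_right, ported as the standard lo/hi binary search while-loop
-- (fuel = hi - lo at entry, which bounds the number of iterations).
def bisectGo (a : List Int) (x : Int) : Nat → Nat → Nat → Nat
  | 0, lo, _ => lo
  | fuel + 1, lo, hi =>
    if lo < hi then
      if x < a.getD ((lo + hi) / 2) 0 then bisectGo a x fuel lo ((lo + hi) / 2)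
      else bisectGo a x fuel ((lo + hi) / 2 + 1) hi
    else lo

def bisectRight (a : List Int) (x : Int) : Nat :=
  bisectGo a x (a.length - 0) 0 a.length

-- B: before = accumulate(map(len, lines), initial=0)[:n]; cut = bisect_right(before, 400); join lines[:cut].
def truncate_lines_alt (lines : List String) : String :=
  let before := ((lines.map PySem.Str.len).scanl (· + ·) 0).take lines.length
  PySem.Str.join "\n" (lines.take (bisectRight before 400))

-- ===== PRECONDITION & SPEC =====
def Spec_truncate_lines (lines : List String) (out : String) : Prop := out = truncate_lines_alt lines
instance (lines : List String) (out : String) : Decidable (Spec_truncate_lines lines out) := by unfold Spec_truncate_lines; infer_instance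

-- ===== CLAIM (what is proved, stated in full; the proofs are below) =====
def Claim_equal_truncate_lines : Prop := ∀ (lines : List String), Dom_truncate_lines lines → Spec_truncate_lines lines (truncate_lines lines)

-- ===== LEMMAS AND PROOFS =====

-- A's loop, tail-recursively flattened (proof helper).
def takeWhileTotal : Int → List String → List String
  | _, [] => []
  | total, line :: rest =>
    if total ≤ 400 then line :: takeWhileTotal (total + PySem.Str.len line) rest
    else []

-- running totals before each line, starting from t (proof helper)
def preFrom (t : Int) (lines : List String) : List Int :=
  ((lines.map PySem.Str.len).scanl (· + ·) t).take lines.length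

theorem len_nonneg (s : String) : 0 ≤ PySem.Str.len s := by
  simp [PySem.Str.len_eq]

theorem preFrom_cons (t : Int) (l : String) (rest : List String) :
    preFrom t (l :: rest) = t :: preFrom (t + PySem.Str.len l) rest := by
  simp [preFrom, List.scanl_cons]

theorem preFrom_length (t : Int) (lines : List String) :
    (preFrom t lines).length = lines.length := by
  simp [preFrom, List.length_scanl]

theorem mem_preFrom_le (lines : List String) :
    ∀ (t : Int) (p : Int), p ∈ preFrom t lines → t ≤ p := by
  induction lines with
  | nil => intro t p hp; simp [preFrom] at hp
  | cons l rest ih =>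
    intro t p hp
    rw [preFrom_cons] at hp
    rcases List.mem_cons.mp hp with h | h
    · omega
    · have := ih (t + PySem.Str.len l) p h
      have := len_nonneg l
      omega

theorem preFrom_pairwise (lines : List String) :
    ∀ (t : Int), (preFrom t lines).Pairwise (· ≤ ·) := by
  induction lines with
  | nil => intro t; simp [preFrom]
  | cons l rest ih =>
    intro t
    rw [preFrom_cons]
    refine List.Pairwise.cons ?_ (ih _)
    intro p hp
    have := mem_preFrom_le rest (t + PySem.Str.len l) p hp
    have := len_nonneg l
    omega

theorem takeWhileTotal_eq_take (lines : List String) :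
    ∀ (t : Int),
      takeWhileTotal t lines
        = lines.take ((preFrom t lines).countP (fun p => decide (p ≤ 400))) := by
  induction lines with
  | nil => intro t; simp [takeWhileTotal]
  | cons l rest ih =>
    intro t
    rw [preFrom_cons]
    by_cases h : t ≤ 400
    · simp [takeWhileTotal, h, ih, List.countP_cons]
    · have hz : ∀ p ∈ preFrom (t + PySem.Str.len l) rest, 400 < p := by
        intro p hp
        have h1 := mem_preFrom_le rest (t + PySem.Str.len l) p hp
        have h2 := len_nonneg l
        omega
      simp [takeWhileTotal, h, List.countP_cons]
      intro p hp
      exact hz p (by simpa using hp)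

theorem truncateLoopA_eq (lines : List String) :
    ∀ (n : Int) (acc : List String),
      truncateLoopA lines n acc = acc ++ takeWhileTotal n lines := by
  induction lines with
  | nil => intro n acc; simp [truncateLoopA, takeWhileTotal]
  | cons line rest ih =>
    intro n acc
    by_cases h : n > 400
    · simp [truncateLoopA, takeWhileTotal, h, not_le.mpr h]
    · simp [truncateLoopA, takeWhileTotal, h, not_lt.mp h, ih]

-- sortedness in index form
theorem getD_mono_of_pairwise (a : List Int) (hs : a.Pairwise (· ≤ ·)) :
    ∀ i j, i ≤ j → j < a.length → a.getD i 0 ≤ a.getD j 0 := by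
  intro i j hij hj
  rcases Nat.lt_or_ge i j with hlt | hge
  · have hi : i < a.length := lt_of_le_of_lt hij hj
    have := (List.pairwise_iff_getElem.mp hs) i j hi hj hlt
    rw [List.getD_eq_getElem a 0 hi, List.getD_eq_getElem a 0 hj]
    exact this
  · have : i = j := le_antisymm hij hge
    subst this; exact le_refl _

theorem bisectGo_spec (a : List Int) (x : Int)
    (hs : ∀ i j, i ≤ j → j < a.length → a.getD i 0 ≤ a.getD j 0) :
    ∀ (fuel lo hi : Nat), lo ≤ hi → hi ≤ a.length → hi - lo ≤ fuel →
      (∀ i, i < lo → a.getD i 0 ≤ x) →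
      (∀ i, hi ≤ i → i < a.length → x < a.getD i 0) →
      bisectGo a x fuel lo hi ≤ a.length ∧
      (∀ i, i < bisectGo a x fuel lo hi → a.getD i 0 ≤ x) ∧
      (∀ i, bisectGo a x fuel lo hi ≤ i → i < a.length → x < a.getD i 0) := by
  intro fuel
  induction fuel with
  | zero =>
    intro lo hi hlh hha hf hlow hhigh
    have : lo = hi := by omega
    subst this
    exact ⟨le_trans hlh hha, by simpa [bisectGo] using hlow, by simpa [bisectGo] using hhigh⟩
  | succ f ih =>
    intro lo hi hlh hha hf hlow hhigh
    by_cases hcmp : lo < hi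
    · have hmidlo : lo ≤ (lo + hi) / 2 := by omega
      have hmidhi : (lo + hi) / 2 < hi := by omega
      by_cases hx : x < a.getD ((lo + hi) / 2) 0
      · have hres : bisectGo a x (f + 1) lo hi = bisectGo a x f lo ((lo + hi) / 2) := by
          simp only [bisectGo]
          rw [if_pos hcmp, if_pos hx]
        rw [hres]
        refine ih lo ((lo + hi) / 2) hmidlo (by omega) (by omega) hlow ?_
        intro i hi' hilen
        exact lt_of_lt_of_le hx (hs _ i hi' hilen)
      · have hres : bisectGo a x (f + 1) lo hi = bisectGo a x f ((lo + hi) / 2 + 1) hi := by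
          simp only [bisectGo]
          rw [if_pos hcmp, if_neg hx]
        rw [hres]
        refine ih ((lo + hi) / 2 + 1) hi (by omega) hha (by omega) ?_ hhigh
        intro i hi'
        have hmlen : (lo + hi) / 2 < a.length := by omega
        exact le_trans (hs i _ (by omega) hmlen) (not_lt.mp hx)
    · have : bisectGo a x (f + 1) lo hi = lo := by simp [bisectGo, hcmp]
      rw [this]
      have : lo = hi := by omega
      subst this
      exact ⟨le_trans hlh hha, hlow, hhigh⟩

theorem count_of_split (x : Int) :
    ∀ (a : List Int) (r : Nat), r ≤ a.length →
      (∀ i, i < r → a.getD i 0 ≤ x) →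
      (∀ i, r ≤ i → i < a.length → x < a.getD i 0) →
      a.countP (fun p => decide (p ≤ x)) = r := by
  intro a
  induction a with
  | nil => intro r hr _ _; simp at hr ⊢; omega
  | cons h t ih =>
    intro r hr hlow hhigh
    cases r with
    | zero =>
      rw [List.countP_eq_zero]
      intro p hp
      rcases List.mem_iff_getElem.mp hp with ⟨i, hilen, hpi⟩
      have := hhigh i (Nat.zero_le _) hilen
      rw [List.getD_eq_getElem _ 0 hilen, hpi] at this
      simp
      omega
    | succ s =>
      have hh : h ≤ x := by
        have := hlow 0 (Nat.succ_pos s)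
        simpa [List.getD_cons_zero] using this
      have hif : (if (fun p => decide (p ≤ x)) h then 1 else 0) = 1 := by simp [hh]
      rw [List.countP_cons, hif]
      have := ih s (by simpa using hr)
        (fun i hi => by simpa [List.getD_cons_succ] using hlow (i + 1) (by omega))
        (fun i hi hilen => by
          simpa [List.getD_cons_succ] using hhigh (i + 1) (by omega) (by simpa using hilen))
      omega

-- ===== VERDICT (by name: the statement is the Claim_ definition above) =====
theorem truncate_lines_spec : Claim_equal_truncate_lines := by
  intro lines _
  unfold Spec_truncate_lines truncate_lines truncate_lines_alt
  rw [truncateLoopA_eq, List.nil_append, takeWhileTotal_eq_take]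
  have hbefore : ((lines.map PySem.Str.len).scanl (· + ·) 0).take lines.length
      = preFrom 0 lines := rfl
  rw [hbefore]
  have hlen : (preFrom 0 lines).length = lines.length := preFrom_length 0 lines
  have hs := getD_mono_of_pairwise (preFrom 0 lines) (preFrom_pairwise lines 0)
  have hspec := bisectGo_spec (preFrom 0 lines) 400 hs
    ((preFrom 0 lines).length - 0) 0 (preFrom 0 lines).length
    (Nat.zero_le _) (le_refl _) (by omega)
    (fun i hi => absurd hi (Nat.not_lt_zero i))
    (fun i hi hilen => absurd hilen (not_lt.mpr hi))
  have hcount := count_of_split 400 (preFrom 0 lines)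
    (bisectGo (preFrom 0 lines) 400 ((preFrom 0 lines).length - 0) 0 (preFrom 0 lines).length)
    hspec.1 hspec.2.1 hspec.2.2
  rw [hcount]
  rfl
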